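-- pv_equiv track=rewrite | github.com/kkojae91/algorithm_prac | python_algorithm/this_is_coding_test/두배열의원소교체.py | solution
-- ===== SOURCE A (Python) =====
-- def solution(n, k, a_list, b_list):
--   # a_list, b_list 정렬
--   a_list.sort()
--   b_list.sort(reverse=True)
--   # a_list의 최솟값을 구하고, b_list의 최댓값을 구한 후 k번 바꿔준다.
--   for idx in range(k):
--     # b_list[idx]가 a_list[idx]보다 클 경우 두자리를 바꿔준다.
--     if a_list[idx] < b_list[idx]:
--       a_list[idx], b_list[idx] = b_list[idx], a_list[idx]
--     # b_list[idx]가 a_list[idx]보다 작거나 같은 경우 반복문 탈출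
--     else:
--       break
--
--   # a_list의 모든 합을 구한다.
--   return sum(a_list)
-- ===== SOURCE B (Python) =====
-- def solution(n, k, a_list, b_list):
--     # Return-value equivalence only: A additionally swaps elements between the
--     # two lists in place; B performs the same two in-place sorts but no swaps.
--     a_list.sort()
--     b_list.sort(reverse=True)
--     pool = a_list + b_list[:max(k, 0)]
--     pool.sort(reverse=True)
--     return sum(pool[:len(a_list)])
-- ===== Notes on version B (the rewrite author's own statement) =====
-- stated objective: alternative
-- what changed: Replaces the pairwise swap loop with break by a multiset selection: pool the sorted a with the k largest of b and sum the len(a) largest elements of the pool; no per-index comparison or swapping remains.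
-- crash fix: When k exceeds min(len(a_list), len(b_list)) and every available sorted pair still has a[i] < b[i] (the break never fires), A raises IndexError; B returns the sum of the len(a_list) largest of a plus the top-k of b. — e.g. on solution(1, 1, [], []): A raises IndexError, B returns 0
import Mathlib
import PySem

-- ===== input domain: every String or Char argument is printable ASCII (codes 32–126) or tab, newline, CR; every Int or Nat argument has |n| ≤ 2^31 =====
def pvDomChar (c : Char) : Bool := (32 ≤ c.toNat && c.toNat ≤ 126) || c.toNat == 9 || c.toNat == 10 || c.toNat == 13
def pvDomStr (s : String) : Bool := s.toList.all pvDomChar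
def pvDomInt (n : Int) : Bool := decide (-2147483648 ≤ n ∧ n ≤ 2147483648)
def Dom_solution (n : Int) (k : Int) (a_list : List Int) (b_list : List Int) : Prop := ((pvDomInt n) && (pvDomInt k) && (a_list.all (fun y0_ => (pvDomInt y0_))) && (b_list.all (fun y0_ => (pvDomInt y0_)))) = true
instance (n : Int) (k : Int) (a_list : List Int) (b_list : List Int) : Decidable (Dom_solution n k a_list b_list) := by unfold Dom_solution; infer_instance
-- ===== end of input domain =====

-- B replaces A's pairwise swap loop (with break) by a multiset selection: pool the sorted a
-- with the top-k of b and sum the len(a) largest of the pool (objective: alternative).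
-- Return-value equivalence only: A additionally swaps elements between the two lists in
-- place, B only performs the same two in-place sorts.

-- ===== PORT A =====
-- the `for idx in range(k)` loop: state = the two (mutated) lists; `break` = stopping the recursion
def solutionLoop (idxs : List Int) (a b : List Int) : List Int :=
  match idxs with
  | [] => a
  | i :: rest =>
    match PySem.List.pyGet? a i, PySem.List.pyGet? b i with
    | some av, some bv =>
      if av < bv then
        solutionLoop rest (PySem.List.pySetD a i bv) (PySem.List.pySetD b i av)
      else a
    | _, _ => a   -- IndexError: excluded by Pre_solution

def solution (n : Int) (k : Int) (a_list : List Int) (b_list : List Int) : Int :=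
  let a1 := PySem.List.sorted a_list (fun x => x) false
  let b1 := PySem.List.sorted b_list (fun x => x) true
  (solutionLoop (PySem.List.pyRange 0 k 1) a1 b1).sum

-- ===== PORT B =====
def solution_alt (n : Int) (k : Int) (a_list : List Int) (b_list : List Int) : Int :=
  let a1 := PySem.List.sorted a_list (fun x => x) false
  let b1 := PySem.List.sorted b_list (fun x => x) true
  let pool := a1 ++ PySem.List.slice b1 none (some (max k 0))
  let p := PySem.List.sorted pool (fun x => x) true
  (PySem.List.slice p none (some (a1.length : Int))).sum

-- ===== PRECONDITION & SPEC =====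
-- Pre_ excludes exactly the inputs on which A raises IndexError: k runs past the end of a
-- list while every available sorted pair still has a[i] < b[i], so the break never fires.
def Pre_solution (n : Int) (k : Int) (a_list : List Int) (b_list : List Int) : Prop :=
  k ≤ (min a_list.length b_list.length : Int) ∨
    ∃ i : Nat, i < min a_list.length b_list.length ∧
      (PySem.List.sorted b_list (fun x => x) true).getD i 0 ≤
        (PySem.List.sorted a_list (fun x => x) false).getD i 0

instance (n : Int) (k : Int) (a_list : List Int) (b_list : List Int) : Decidable (Pre_solution n k a_list b_list) := by unfold Pre_solution; infer_instance

def pvWitness_solution : Int × Int × List Int × List Int := (3, 2, [1, 5, 3], [2, 4, 6])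

-- On inputs where k exceeds min(len(a_list), len(b_list)) and every available sorted pair
-- has a[i] < b[i], A raises IndexError; B returns the sum of the len(a_list) largest
-- elements of a plus the top-k of b.
def Raises_solution (n : Int) (k : Int) (a_list : List Int) (b_list : List Int) : Prop :=
  (min a_list.length b_list.length : Int) < k ∧
    ∀ i : Nat, i < min a_list.length b_list.length →
      (PySem.List.sorted a_list (fun x => x) false).getD i 0 <
        (PySem.List.sorted b_list (fun x => x) true).getD i 0

instance (n : Int) (k : Int) (a_list : List Int) (b_list : List Int) : Decidable (Raises_solution n k a_list b_list) := by unfold Raises_solution; infer_instance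

def pvRaiseWitness_solution : Int × Int × List Int × List Int := (1, 1, [], [])
def pvRaiseWitnessOut_solution : Int := 0

def Spec_solution (n : Int) (k : Int) (a_list : List Int) (b_list : List Int) (out : Int) : Prop := out = solution_alt n k a_list b_list
instance (n : Int) (k : Int) (a_list : List Int) (b_list : List Int) (out : Int) : Decidable (Spec_solution n k a_list b_list out) := by unfold Spec_solution; infer_instance

-- ===== CLAIM (what is proved, stated in full; the proofs are below) =====
def Claim_equal_solution : Prop := ∀ (n : Int) (k : Int) (a_list : List Int) (b_list : List Int), Dom_solution n k a_list b_list → Pre_solution n k a_list b_list → Spec_solution n k a_list b_list (solution n k a_list b_list)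

def Claim_raises_solution : Prop := (∀ (n : Int) (k : Int) (a_list : List Int) (b_list : List Int), Dom_solution n k a_list b_list → Raises_solution n k a_list b_list → ¬ Pre_solution n k a_list b_list) ∧ (Dom_solution (pvRaiseWitness_solution.1) (pvRaiseWitness_solution.2.1) (pvRaiseWitness_solution.2.2.1) (pvRaiseWitness_solution.2.2.2) ∧ Raises_solution (pvRaiseWitness_solution.1) (pvRaiseWitness_solution.2.1) (pvRaiseWitness_solution.2.2.1) (pvRaiseWitness_solution.2.2.2) ∧ solution_alt (pvRaiseWitness_solution.1) (pvRaiseWitness_solution.2.1) (pvRaiseWitness_solution.2.2.1) (pvRaiseWitness_solution.2.2.2) = pvRaiseWitnessOut_solution)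

-- ===== LEMMAS AND PROOFS =====

theorem pvSumSet (xs : List Int) (j : Nat) (v : Int) (h : j < xs.length) :
    (xs.set j v).sum = xs.sum + (v - xs.getD j 0) := by
  rw [List.getD_eq_getElem _ _ h]
  induction xs generalizing j with
  | nil => simp at h
  | cons x xs ih =>
    cases j with
    | zero => simp [List.set]; ring
    | succ j => simp only [List.set, List.sum_cons, ih j (by simpa using h)]; simp; ring

theorem pvGetDSetNe (xs : List Int) (j p : Nat) (v : Int) (h : p ≠ j) :
    (xs.set j v).getD p 0 = xs.getD p 0 := by
  simp [List.getD_eq_getElem?_getD, List.getElem?_set_ne (by omega : j ≠ p)]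

-- A's loop characterised: from index j with m iterations left, on index-monotone lists,
-- the final sum is the current sum plus the positive deltas of the pairs still ahead
theorem solutionLoop_sum (m : Nat) : ∀ (j : Nat) (a b : List Int),
    (∀ p q : Nat, j ≤ p → p ≤ q → q < a.length → a.getD p 0 ≤ a.getD q 0) →
    (∀ p q : Nat, j ≤ p → p ≤ q → q < b.length → b.getD q 0 ≤ b.getD p 0) →
    (j + m ≤ min a.length b.length ∨
      ∃ i : Nat, j ≤ i ∧ i < min a.length b.length ∧ b.getD i 0 ≤ a.getD i 0) →
    (solutionLoop ((List.range m).map (fun t => ((j + t : Nat) : Int))) a b).sum =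
      a.sum + ((List.range (min (j + m) (min a.length b.length) - j)).map
        (fun t => max (b.getD (j + t) 0 - a.getD (j + t) 0) 0)).sum := by
  induction m with
  | zero =>
    intro j a b _ _ _
    simp [solutionLoop]
  | succ m ih =>
    intro j a b Ha Hb Hnr
    by_cases hj : j < min a.length b.length
    · have hja : j < a.length := by omega
      have hjb : j < b.length := by omega
      rw [List.range_succ_eq_map, List.map_cons, List.map_map]
      have htail : ((List.range m).map ((fun t => ((j + t : Nat) : Int)) ∘ Nat.succ)) =
          (List.range m).map (fun t => (((j + 1) + t : Nat) : Int)) := by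
        apply List.map_congr_left; intro t _; simp only [Function.comp_apply]; push_cast; ring
      rw [htail]
      simp only [solutionLoop, Nat.add_zero, PySem.List.pyGet?_natCast,
        List.getElem?_eq_getElem hja, List.getElem?_eq_getElem hjb]
      rw [← List.getD_eq_getElem a 0 hja, ← List.getD_eq_getElem b 0 hjb]
      by_cases hlt : a.getD j 0 < b.getD j 0
      · simp only [hlt, if_true, PySem.List.pySetD_natCast]
        rw [ih (j + 1) (a.set j (b.getD j 0)) (b.set j (a.getD j 0))
          (by intro p q hp hq hql
              rw [pvGetDSetNe _ _ _ _ (by omega), pvGetDSetNe _ _ _ _ (by omega)]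
              exact Ha p q (by omega) hq (by simpa using hql))
          (by intro p q hp hq hql
              rw [pvGetDSetNe _ _ _ _ (by omega), pvGetDSetNe _ _ _ _ (by omega)]
              exact Hb p q (by omega) hq (by simpa using hql))
          (by rcases Hnr with h | ⟨i, hji, hiL, hba⟩
              · left; simp only [List.length_set]; omega
              · right
                have hij : i ≠ j := by intro e; rw [e] at hba; omega
                exact ⟨i, by omega, by simpa using hiL,
                  by rw [pvGetDSetNe _ _ _ _ hij, pvGetDSetNe _ _ _ _ hij]; exact hba⟩)]
        rw [pvSumSet _ _ _ hja]
        have hLs : min (a.set j (b.getD j 0)).length (b.set j (a.getD j 0)).length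
            = min a.length b.length := by simp
        have hmin : min (j + (m + 1)) (min a.length b.length) - j
            = (min ((j + 1) + m) (min a.length b.length) - (j + 1)) + 1 := by omega
        rw [hLs, hmin, List.range_succ_eq_map, List.map_cons, List.map_map]
        simp only [Nat.add_zero, List.sum_cons]
        have hterms : ((List.range (min (j + 1 + m) (min a.length b.length) - (j + 1))).map
              (fun t => max ((b.set j (a.getD j 0)).getD (j + 1 + t) 0
                - (a.set j (b.getD j 0)).getD (j + 1 + t) 0) 0)) =
            ((List.range (min (j + 1 + m) (min a.length b.length) - (j + 1))).map
              ((fun t => max (b.getD (j + t) 0 - a.getD (j + t) 0) 0) ∘ Nat.succ)) := by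
          apply List.map_congr_left; intro t _
          have e : j + Nat.succ t = j + 1 + t := by omega
          simp only [Function.comp_apply, e,
            pvGetDSetNe _ _ _ _ (show j + 1 + t ≠ j by omega)]
        rw [hterms]
        have hmax : max (b.getD j 0 - a.getD j 0) 0 = b.getD j 0 - a.getD j 0 := by omega
        rw [hmax]
        ring
      · simp only [hlt, if_false]
        have hz : ((List.range (min (j + (m + 1)) (min a.length b.length) - j)).map
            (fun t => max (b.getD (j + t) 0 - a.getD (j + t) 0) 0)).sum = 0 := by
          apply List.sum_eq_zero
          intro x hx
          simp only [List.mem_map, List.mem_range] at hx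
          obtain ⟨t, ht, rfl⟩ := hx
          have h1 : a.getD j 0 ≤ a.getD (j + t) 0 := Ha j (j + t) le_rfl (by omega) (by omega)
          have h2 : b.getD (j + t) 0 ≤ b.getD j 0 := Hb j (j + t) le_rfl (by omega) (by omega)
          omega
        rw [hz, add_zero]
    · exfalso
      rcases Hnr with h | ⟨i, hji, hiL, _⟩ <;> omega

-- the selection lemma: the |s|-prefix of a descending list that splits (as a multiset)
-- into s ++ d with every element of d ≤ every element of s sums to s.sum
theorem pvSelSum : ∀ (P : List Int), List.Pairwise (fun x y => y ≤ x) P →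
    ∀ (s d : List Int), P.Perm (s ++ d) → (∀ x ∈ s, ∀ y ∈ d, y ≤ x) →
    (P.take s.length).sum = s.sum := by
  intro P
  induction P with
  | nil =>
    intro _ s d hp _
    have h0 : s ++ d = [] := hp.symm.eq_nil
    have : s = [] := by
      rcases List.append_eq_nil_iff.mp h0 with ⟨hs, _⟩; exact hs
    simp [this]
  | cons p P' ih =>
    intro hpw s d hp hsep
    match s with
    | [] => simp
    | q :: s' =>
      have hpmem : p ∈ q :: s' := by
        have hpin : p ∈ (q :: s') ++ d := hp.mem_iff.mp (by simp)
        rcases List.mem_append.mp hpin with h | h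
        · exact h
        · have hq_le_p : q ≤ p := by
            have hqP : q ∈ p :: P' := hp.symm.mem_iff.mp (by simp)
            rcases List.mem_cons.mp hqP with h' | hq
            · exact le_of_eq h'
            · exact (List.pairwise_cons.mp hpw).1 q hq
          have hp_le_q : p ≤ q := hsep q (by simp) p h
          have hqp : q = p := le_antisymm hq_le_p hp_le_q
          exact hqp ▸ List.mem_cons_self
      have hs_perm : (q :: s').Perm (p :: (q :: s').erase p) := List.perm_cons_erase hpmem
      have hP'perm : P'.Perm ((q :: s').erase p ++ d) := by
        have h1 : (p :: P').Perm ((p :: (q :: s').erase p) ++ d) :=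
          hp.trans (hs_perm.append_right d)
        have h2 : (p :: (q :: s').erase p) ++ d = p :: ((q :: s').erase p ++ d) := by simp
        exact (h2 ▸ h1).cons_inv
      have hlen : ((q :: s').erase p).length = s'.length := by
        rw [List.length_erase_of_mem hpmem]; simp
      have hsum : (q :: s').sum = p + ((q :: s').erase p).sum := by
        have := hs_perm.sum_eq; simpa using this
      have hih := ih (List.pairwise_cons.mp hpw).2 ((q :: s').erase p) d hP'perm
        (fun x hx y hy => hsep x (List.mem_of_mem_erase hx) y hy)
      rw [hlen] at hih
      simp only [List.length_cons, List.take_succ_cons, List.sum_cons, hih, hsum]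

-- {x, y} = {max x y, min x y}, lifted pointwise to two equal-length lists
theorem pvPermZipMaxMin : ∀ (xs ys : List Int), xs.length = ys.length →
    (xs ++ ys).Perm (List.zipWith max xs ys ++ List.zipWith min xs ys) := by
  intro xs
  induction xs with
  | nil => intro ys h; cases ys with
    | nil => simp
    | cons y ys => simp at h
  | cons x xs ih =>
    intro ys h
    cases ys with
    | nil => simp at h
    | cons y ys =>
      have hlen : xs.length = ys.length := by simpa using h
      have h1 : (x :: xs ++ y :: ys).Perm (x :: y :: (xs ++ ys)) := by
        exact List.Perm.cons x List.perm_middle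
      have h2 : (x :: y :: (xs ++ ys)).Perm
          (x :: y :: (List.zipWith max xs ys ++ List.zipWith min xs ys)) :=
        ((ih ys hlen).cons y).cons x
      have h3 : (x :: y :: (List.zipWith max xs ys ++ List.zipWith min xs ys)).Perm
          (max x y :: min x y :: (List.zipWith max xs ys ++ List.zipWith min xs ys)) := by
        rcases le_total x y with hxy | hxy
        · rw [max_eq_right hxy, min_eq_left hxy]; exact List.Perm.swap y x _
        · rw [max_eq_left hxy, min_eq_right hxy]
      have h4 : (max x y :: min x y ::
            (List.zipWith max xs ys ++ List.zipWith min xs ys)).Perm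
          (List.zipWith max (x :: xs) (y :: ys) ++ List.zipWith min (x :: xs) (y :: ys)) := by
        simp only [List.zipWith_cons_cons, List.cons_append]
        exact (List.perm_middle.symm.cons (max x y))
      exact ((h1.trans h2).trans h3).trans h4

theorem pvSumZipMax : ∀ (xs ys : List Int), xs.length = ys.length →
    (List.zipWith max xs ys).sum =
      xs.sum + (List.zipWith (fun x y => max (y - x) 0) xs ys).sum := by
  intro xs
  induction xs with
  | nil => intro ys h; cases ys <;> simp at h ⊢
  | cons x xs ih =>
    intro ys h
    cases ys with
    | nil => simp at h
    | cons y ys =>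
      have hlen : xs.length = ys.length := by simpa using h
      have hx : max x y = x + max (y - x) 0 := by
        rcases le_total x y with hxy | hxy
        · rw [max_eq_right hxy, max_eq_left (by omega : (0:Int) ≤ y - x)]; ring
        · rw [max_eq_left hxy, max_eq_right (by omega : y - x ≤ (0:Int))]; ring
      simp only [List.zipWith_cons_cons, List.sum_cons, ih ys hlen, hx]
      ring

theorem pvZipTakeEqMapRange (f : Int → Int → Int) (M : Nat) (xs ys : List Int)
    (hx : M ≤ xs.length) (hy : M ≤ ys.length) :
    List.zipWith f (xs.take M) (ys.take M) =
      (List.range M).map (fun i => f (xs.getD i 0) (ys.getD i 0)) := by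
  apply List.ext_getElem
  · simp; omega
  · intro i h1 h2
    have hi : i < M := by simpa using h2
    have hix : i < xs.length := by omega
    have hiy : i < ys.length := by omega
    simp only [List.getElem_zipWith, List.getElem_take, List.getElem_map,
      List.getElem_range, List.getD_eq_getElem _ _ hix, List.getD_eq_getElem _ _ hiy]

theorem pvPermShuffle (w x y z : List Int) :
    ((w ++ x) ++ (y ++ z)).Perm ((w ++ y) ++ (x ++ z)) := by
  have e1 : (w ++ x) ++ (y ++ z) = w ++ (x ++ (y ++ z)) := by simp
  have e2 : (w ++ y) ++ (x ++ z) = w ++ (y ++ (x ++ z)) := by simp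
  rw [e1, e2]
  apply List.Perm.append_left
  rw [← List.append_assoc, ← List.append_assoc]
  exact List.perm_append_comm.append_right z

-- B's selection characterised by the same clamped-delta sum, on index-monotone lists
theorem pvAltSum (A1 B1 : List Int) (kk : Nat)
    (Ha : ∀ p q : Nat, p ≤ q → q < A1.length → A1.getD p 0 ≤ A1.getD q 0)
    (Hb : ∀ p q : Nat, p ≤ q → q < B1.length → B1.getD q 0 ≤ B1.getD p 0) :
    ((PySem.List.sorted (A1 ++ B1.take kk) (fun x => x) true).take A1.length).sum
      = A1.sum + ((List.range (min kk (min A1.length B1.length))).map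
          (fun i => max (B1.getD i 0 - A1.getD i 0) 0)).sum := by
  set M := min kk (min A1.length B1.length) with hM
  have hMa : M ≤ A1.length := by omega
  have hMb : M ≤ B1.length := by omega
  have hMk : M ≤ kk := by omega
  set s := List.zipWith max (A1.take M) (B1.take M) ++ A1.drop M with hs
  set d := List.zipWith min (A1.take M) (B1.take M) ++ (B1.take kk).drop M with hd
  have hlta : (A1.take M).length = M := by simp; omega
  have hltb : (B1.take M).length = M := by simp; omega
  have hlen_s : s.length = A1.length := by
    simp only [hs, List.length_append, List.length_zipWith, hlta, hltb, List.length_drop]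
    omega
  -- the pool splits as s ++ d
  have hpool : (A1 ++ B1.take kk).Perm (s ++ d) := by
    have e1 : A1 ++ B1.take kk
        = (A1.take M ++ A1.drop M) ++ ((B1.take kk).take M ++ (B1.take kk).drop M) := by
      rw [List.take_append_drop, List.take_append_drop]
    have e2 : (B1.take kk).take M = B1.take M := by
      rw [List.take_take]; congr 1; omega
    rw [e1, e2, hs, hd]
    refine (pvPermShuffle _ _ _ _).trans ?_
    refine (List.Perm.append_right _
      (pvPermZipMaxMin (A1.take M) (B1.take M) (by rw [hlta, hltb]))).trans ?_
    exact pvPermShuffle _ _ _ _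
  -- separation: every element of d is ≤ every element of s
  have hsep : ∀ x ∈ s, ∀ y ∈ d, y ≤ x := by
    intro x hx y hy
    rw [hs, List.mem_append] at hx
    rw [hd, List.mem_append] at hy
    rcases hx with hx | hx
    · -- x = max (A1[i]) (B1[i]) for some i < M
      obtain ⟨i, hi, hxe⟩ := List.mem_iff_getElem.mp hx
      have hiM : i < M := by simpa [List.length_zipWith, hlta, hltb] using hi
      have hxv : x = max (A1.getD i 0) (B1.getD i 0) := by
        rw [List.getD_eq_getElem _ _ (show i < A1.length by omega),
          List.getD_eq_getElem _ _ (show i < B1.length by omega), ← hxe]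
        simp [List.getElem_zipWith, List.getElem_take]
      rcases hy with hy | hy
      · -- y = min (A1[j]) (B1[j]) for some j < M
        obtain ⟨j, hj, hye⟩ := List.mem_iff_getElem.mp hy
        have hjM : j < M := by simpa [List.length_zipWith, hlta, hltb] using hj
        have hyv : y = min (A1.getD j 0) (B1.getD j 0) := by
          rw [List.getD_eq_getElem _ _ (show j < A1.length by omega),
            List.getD_eq_getElem _ _ (show j < B1.length by omega), ← hye]
          simp [List.getElem_zipWith, List.getElem_take]
        rcases le_total j i with hij | hij
        · have h1 : A1.getD j 0 ≤ A1.getD i 0 := Ha j i hij (by omega)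
          rw [hxv, hyv]; omega
        · have h1 : B1.getD j 0 ≤ B1.getD i 0 := Hb i j hij (by omega)
          rw [hxv, hyv]; omega
      · -- y = B1[M + t] for some t, with M + t < min kk B1.length
        obtain ⟨t, ht, hye⟩ := List.mem_iff_getElem.mp hy
        have htl : M + t < B1.length := by
          have := ht; simp only [List.length_drop, List.length_take] at this; omega
        have hyv : y = B1.getD (M + t) 0 := by
          rw [List.getD_eq_getElem _ _ htl, ← hye]
          simp [List.getElem_drop, List.getElem_take]
        have h1 : B1.getD (M + t) 0 ≤ B1.getD i 0 := Hb i (M + t) (by omega) htl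
        rw [hxv, hyv]; omega
    · -- x = A1[M + l] for some l: then A1.drop M nonempty so M < A1.length
      obtain ⟨l, hl, hxe⟩ := List.mem_iff_getElem.mp hx
      have hll : M + l < A1.length := by
        have := hl; simp only [List.length_drop] at this; omega
      have hxv : x = A1.getD (M + l) 0 := by
        rw [List.getD_eq_getElem _ _ hll, ← hxe]
        simp [List.getElem_drop]
      rcases hy with hy | hy
      · obtain ⟨j, hj, hye⟩ := List.mem_iff_getElem.mp hy
        have hjM : j < M := by simpa [List.length_zipWith, hlta, hltb] using hj
        have hyv : y = min (A1.getD j 0) (B1.getD j 0) := by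
          rw [List.getD_eq_getElem _ _ (show j < A1.length by omega),
            List.getD_eq_getElem _ _ (show j < B1.length by omega), ← hye]
          simp [List.getElem_zipWith, List.getElem_take]
        have h1 : A1.getD j 0 ≤ A1.getD (M + l) 0 := Ha j (M + l) (by omega) hll
        rw [hxv, hyv]; omega
      · -- impossible: M < kk, M < B1.length and M < A1.length contradict M = min
        exfalso
        obtain ⟨t, ht, _⟩ := List.mem_iff_getElem.mp hy
        have := ht; simp only [List.length_drop, List.length_take] at this
        omega
  -- select: the A1.length-prefix of the descending pool sums to s.sum
  have hpw : List.Pairwise (fun x y : Int => y ≤ x)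
      (PySem.List.sorted (A1 ++ B1.take kk) (fun x => x) true) :=
    PySem.List.sorted_pairwise_rev (A1 ++ B1.take kk) (fun x => x)
  have hperm : (PySem.List.sorted (A1 ++ B1.take kk) (fun x => x) true).Perm (s ++ d) :=
    (PySem.List.sorted_perm (A1 ++ B1.take kk) (fun x => x) true).trans hpool
  have hsel := pvSelSum _ hpw s d hperm hsep
  rw [hlen_s] at hsel
  rw [hsel, hs, List.sum_append, pvSumZipMax _ _ (by rw [hlta, hltb]),
    pvZipTakeEqMapRange (fun x y => max (y - x) 0) M A1 B1 hMa hMb]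
  have hsplit : (A1.take M).sum + (A1.drop M).sum = A1.sum := by
    rw [← List.sum_append, List.take_append_drop]
  omega

-- ===== VERDICT (by name: the statement is the Claim_ definition above) =====
theorem solution_spec : Claim_equal_solution := by
  intro n k a b hdom hpre
  unfold Spec_solution solution solution_alt
  simp only []
  have hla : (PySem.List.sorted a (fun x => x) false).length = a.length :=
    PySem.List.length_sorted a (fun x => x) false
  have hlb : (PySem.List.sorted b (fun x => x) true).length = b.length :=
    PySem.List.length_sorted b (fun x => x) true
  have Ha : ∀ p q : Nat, p ≤ q → q < (PySem.List.sorted a (fun x => x) false).length →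
      (PySem.List.sorted a (fun x => x) false).getD p 0 ≤
      (PySem.List.sorted a (fun x => x) false).getD q 0 := by
    intro p q hpq hq
    have hp : p < (PySem.List.sorted a (fun x => x) false).length := by omega
    rw [List.getD_eq_getElem _ _ hp, List.getD_eq_getElem _ _ hq]
    rcases Nat.lt_or_ge p q with h | h
    · exact (List.pairwise_iff_getElem.mp (PySem.List.sorted_pairwise a (fun x => x))) p q _ hq h
    · have : p = q := by omega
      subst this; exact le_rfl
  have Hb : ∀ p q : Nat, p ≤ q → q < (PySem.List.sorted b (fun x => x) true).length →
      (PySem.List.sorted b (fun x => x) true).getD q 0 ≤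
      (PySem.List.sorted b (fun x => x) true).getD p 0 := by
    intro p q hpq hq
    have hp : p < (PySem.List.sorted b (fun x => x) true).length := by omega
    rw [List.getD_eq_getElem _ _ hp, List.getD_eq_getElem _ _ hq]
    rcases Nat.lt_or_ge p q with h | h
    · exact (List.pairwise_iff_getElem.mp (PySem.List.sorted_pairwise_rev b (fun x => x))) p q _ hq h
    · have : p = q := by omega
      subst this; exact le_rfl
  have hrange : PySem.List.pyRange 0 k 1 =
      (List.range k.toNat).map (fun t : Nat => (((0 : Nat) + t : Nat) : Int)) := by
    rw [PySem.List.pyRange_one]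
    simp
  have hsliceb : PySem.List.slice (PySem.List.sorted b (fun x => x) true) none (some (max k 0))
      = (PySem.List.sorted b (fun x => x) true).take k.toNat := by
    rw [show (max k 0) = ((k.toNat : Nat) : Int) by omega]
    exact PySem.List.slice_to_natCast _ _
  rw [hrange, solutionLoop_sum k.toNat 0 _ _ (fun p q _ => Ha p q) (fun p q _ => Hb p q)
    (by rcases hpre with h | ⟨i, hi, hba⟩
        · left; rw [hla, hlb]; omega
        · right; exact ⟨i, Nat.zero_le i, by rw [hla, hlb]; exact hi, hba⟩),
    hsliceb, PySem.List.slice_to_natCast, pvAltSum _ _ k.toNat Ha Hb]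
  congr 1
  refine congrArg List.sum ?_
  refine congrArg (List.map _) ?_ |>.trans (List.map_congr_left ?_)
  · congr 1; omega
  · intro i _; simp

@[simp]
theorem solution_raises : Claim_raises_solution := by
  unfold Claim_raises_solution
  constructor
  · intro n k a b _ hr hpre
    obtain ⟨h1, h2⟩ := hr
    rcases hpre with h | ⟨i, hi, hba⟩
    · omega
    · have := h2 i hi
      omega
  · exact ⟨by decide, by decide, by decide⟩
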